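-- pv_equiv track=rewrite | github.com/Holly-Jiang/qmap_sdp | qmapping/test1.py | L2PP
-- ===== SOURCE A (Python) =====
-- def L2PP(x: list, q: int):
--     phy_var = list()
--     for i in range(len(x)):
--         if isinstance(x[i][q], int) and x[i][q] != 0:
--             return [i]
--         elif not isinstance(x[i][q], int):
--             phy_var.append(i)
--     return phy_var
-- ===== SOURCE B (Python) =====
-- def L2PP(x: list, q: int):
--     # phase 1: advance a cursor past the prefix with no nonzero-int entry in column q
--     stop = 0
--     while stop < len(x) and not (isinstance(x[stop][q], int) and x[stop][q] != 0):
--         stop += 1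
--     if stop < len(x):
--         return [stop]
--     # phase 2: no nonzero-int entry anywhere -> collect the non-int rows
--     return [i for i, row in enumerate(x) if not isinstance(row[q], int)]
-- ===== Notes on version B (the rewrite author's own statement) =====
-- stated objective: alternative
-- what changed: Replaces A's single accumulating for-loop with early return by a two-phase decomposition: a counting while-loop that measures the length of the prefix with no nonzero-int entry, then (only if none exists) a comprehension over enumerate(x) collecting the non-int rows.
import Mathlib
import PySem

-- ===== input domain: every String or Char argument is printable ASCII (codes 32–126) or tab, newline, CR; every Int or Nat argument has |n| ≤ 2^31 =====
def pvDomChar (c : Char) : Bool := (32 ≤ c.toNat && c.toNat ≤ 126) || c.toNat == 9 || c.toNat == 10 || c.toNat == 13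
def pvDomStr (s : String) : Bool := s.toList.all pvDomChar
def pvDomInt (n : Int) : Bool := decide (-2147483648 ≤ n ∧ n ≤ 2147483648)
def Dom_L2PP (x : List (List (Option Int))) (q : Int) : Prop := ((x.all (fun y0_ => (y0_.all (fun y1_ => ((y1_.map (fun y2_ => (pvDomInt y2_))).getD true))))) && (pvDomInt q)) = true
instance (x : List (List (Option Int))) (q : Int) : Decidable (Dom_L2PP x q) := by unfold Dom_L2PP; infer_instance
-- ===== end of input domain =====

-- B replaces A's single accumulating loop-with-early-return by a two-phase decomposition
-- (a while-loop counting the stop-free prefix, then a comprehension over enumerate): alternative, same cost.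


-- ===== PORT A =====
-- A's loop: early return [i] on a nonzero int entry, append i for a non-int (None) entry.
-- On an out-of-range q Python raises IndexError (pyGet? = none); that input is outside Pre_.
def L2PPGo (q : Int) : List (List (Option Int)) → Nat → List Int → List Int
  | [], _, acc => acc
  | row :: rest, i, acc =>
    match PySem.List.pyGet? row q with
    | none => acc                                        -- IndexError in Python; outside Pre_
    | some (some v) => if v ≠ 0 then [(i : Int)] else L2PPGo q rest (i + 1) acc
    | some none => L2PPGo q rest (i + 1) (acc ++ [(i : Int)])

def L2PP (x : List (List (Option Int))) (q : Int) : List Int := L2PPGo q x 0 []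

-- ===== PORT B =====
-- does this row carry a nonzero int in column q? (false as well when q is out of range,
-- where Python raises; those inputs are outside Pre_)
def pvStop (q : Int) (row : List (Option Int)) : Bool :=
  match PySem.List.pyGet? row q with
  | some (some v) => v != 0
  | _ => false

-- phase 1 of Source B: the counting while-loop = length of the stop-free prefix
def pvStopIdx (q : Int) : List (List (Option Int)) → Nat
  | [] => 0
  | row :: rest => if pvStop q row then 0 else pvStopIdx q rest + 1

def L2PP_alt (x : List (List (Option Int))) (q : Int) : List Int :=
  let stop := pvStopIdx q x
  if stop < x.length then [(stop : Int)]
  else      -- phase 2 of Source B: the comprehension over the non-int rows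
    ((PySem.List.enumerate x).filter
        (fun p => PySem.List.pyGet? p.2 q == some none)).map (·.1)

-- ===== PRECONDITION & SPEC =====
-- exactly the inputs on which Python A returns: q is in range for every row the loop
-- actually reaches (i.e. every row not preceded by an early-returning row).
def Pre_L2PP (x : List (List (Option Int))) (q : Int) : Prop :=
  ∀ i, i < x.length →
    (∀ j, j < i → pvStop q (x.getD j []) = false) →
    PySem.Raise.InRange (x.getD i []).length q
instance (x : List (List (Option Int))) (q : Int) : Decidable (Pre_L2PP x q) := by
  unfold Pre_L2PP; infer_instance

def pvWitness_L2PP : List (List (Option Int)) × Int := ([[none, some 0], [some 5]], 0)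

def Spec_L2PP (x : List (List (Option Int))) (q : Int) (out : List Int) : Prop := out = L2PP_alt x q
instance (x : List (List (Option Int))) (q : Int) (out : List Int) : Decidable (Spec_L2PP x q out) := by unfold Spec_L2PP; infer_instance

-- ===== CLAIM (what is proved, stated in full; the proofs are below) =====
def Claim_equal_L2PP : Prop := ∀ (x : List (List (Option Int))) (q : Int), Dom_L2PP x q → Pre_L2PP x q → Spec_L2PP x q (L2PP x q)

-- ===== LEMMAS AND PROOFS =====

lemma pre_cons {q : Int} {row : List (Option Int)} {rest : List (List (Option Int))}
    (h : Pre_L2PP (row :: rest) q) :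
    PySem.Raise.InRange row.length q ∧ (pvStop q row = false → Pre_L2PP rest q) := by
  constructor
  · have := h 0 (by simp) (by intro j hj; omega)
    simpa using this
  · intro hstop i hi hpref
    have := h (i + 1) (by simpa using Nat.succ_lt_succ hi) (by
      intro j hj
      cases j with
      | zero => simpa using hstop
      | succ j' => simpa using hpref j' (by omega))
    simpa using this

lemma go_eq (q : Int) : ∀ (xs : List (List (Option Int))) (i : Nat) (acc : List Int),
    Pre_L2PP xs q →
    L2PPGo q xs i acc =
      (if pvStopIdx q xs < xs.length then [((i + pvStopIdx q xs : Nat) : Int)]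
       else acc ++ ((PySem.List.enumerate xs (i : Int)).filter
            (fun p => PySem.List.pyGet? p.2 q == some none)).map (·.1)) := by
  intro xs
  induction xs with
  | nil => intro i acc _; simp [L2PPGo, pvStopIdx, PySem.List.enumerate_nil]
  | cons row rest ih =>
    intro i acc hpre
    obtain ⟨hin, hrest⟩ := pre_cons hpre
    obtain ⟨e, he⟩ : ∃ e, PySem.List.pyGet? row q = some e := by
      rcases h' : PySem.List.pyGet? row q with _ | e
      · exact absurd ((PySem.List.pyGet?_eq_none_iff row q).mp h') (by simpa using hin)
      · exact ⟨e, rfl⟩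
    cases e with
    | none =>
      have hstop : pvStop q row = false := by simp [pvStop, he]
      rw [show L2PPGo q (row :: rest) i acc = L2PPGo q rest (i + 1) (acc ++ [(i : Int)]) by
            simp [L2PPGo, he],
          ih (i + 1) (acc ++ [(i : Int)]) (hrest hstop)]
      rw [show pvStopIdx q (row :: rest) = pvStopIdx q rest + 1 by simp [pvStopIdx, hstop]]
      by_cases hf : pvStopIdx q rest < rest.length
      · simp only [List.length_cons, if_pos (by omega : pvStopIdx q rest + 1 < rest.length + 1),
          if_pos hf]
        congr 1; omega
      · simp only [List.length_cons, if_neg (by omega : ¬ pvStopIdx q rest + 1 < rest.length + 1),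
          if_neg hf]
        rw [PySem.List.enumerate_cons]; simp [he, List.append_assoc]
    | some v =>
      by_cases hv : v = 0
      · subst hv
        have hstop : pvStop q row = false := by simp [pvStop, he]
        rw [show L2PPGo q (row :: rest) i acc = L2PPGo q rest (i + 1) acc by
              simp [L2PPGo, he],
            ih (i + 1) acc (hrest hstop)]
        rw [show pvStopIdx q (row :: rest) = pvStopIdx q rest + 1 by simp [pvStopIdx, hstop]]
        by_cases hf : pvStopIdx q rest < rest.length
        · simp only [List.length_cons, if_pos (by omega : pvStopIdx q rest + 1 < rest.length + 1),
            if_pos hf]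
          congr 1; omega
        · simp only [List.length_cons, if_neg (by omega : ¬ pvStopIdx q rest + 1 < rest.length + 1),
            if_neg hf]
          rw [PySem.List.enumerate_cons]; simp [he]
      · have hstop : pvStop q row = true := by simp [pvStop, he, hv]
        simp [L2PPGo, he, hv, pvStopIdx, hstop]

-- ===== VERDICT (by name: the statement is the Claim_ definition above) =====
theorem L2PP_spec : Claim_equal_L2PP := by
  intro x q _ hpre
  unfold Spec_L2PP L2PP L2PP_alt
  rw [go_eq q x 0 [] hpre]
  simp
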